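-- pv_equiv track=rewrite | github.com/estraviz/codewars | 7_kyu/Help Suzuki count his vegetables.../python/solution.py | count_vegetables
-- ===== SOURCE A (Python) =====
-- from collections import Counter
-- from operator import itemgetter
--
-- def count_vegetables(string):
--     vegetables = [
--         "cabbage", "carrot", "celery", "cucumber", "mushroom", "onion",
--         "pepper", "potato", "tofu", "turnip"
--     ]
--     return sorted(
--         [
--             (value, key) for key, value in Counter(string.split()).items()
--             if key in vegetables
--         ], key=itemgetter(0, 1), reverse=True
--     )
-- ===== SOURCE B (Python) =====
-- def count_vegetables(string):
--     vegetables = [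
--         "cabbage", "carrot", "celery", "cucumber", "mushroom", "onion",
--         "pepper", "potato", "tofu", "turnip"
--     ]
--
--     def runs(ws):
--         # run-length encode a sorted word list
--         if not ws:
--             return []
--         head = ws[0]
--         k = 1
--         while k < len(ws) and ws[k] == head:
--             k += 1
--         return [(head, k)] + runs(ws[k:])
--
--     result = [(c, w) for (w, c) in runs(sorted(string.split())) if w in vegetables]
--     result.sort(reverse=True)
--     return result
-- ===== Notes on version B (the rewrite author's own statement) =====
-- stated objective: alternative
-- what changed: B replaces A's hash-based Counter with sort-based counting: it sorts the split word list, run-length-encodes consecutive equal words recursively, keeps the vegetable runs, and sorts the resulting (count, name) pairs descending as A does.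
import Mathlib
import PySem

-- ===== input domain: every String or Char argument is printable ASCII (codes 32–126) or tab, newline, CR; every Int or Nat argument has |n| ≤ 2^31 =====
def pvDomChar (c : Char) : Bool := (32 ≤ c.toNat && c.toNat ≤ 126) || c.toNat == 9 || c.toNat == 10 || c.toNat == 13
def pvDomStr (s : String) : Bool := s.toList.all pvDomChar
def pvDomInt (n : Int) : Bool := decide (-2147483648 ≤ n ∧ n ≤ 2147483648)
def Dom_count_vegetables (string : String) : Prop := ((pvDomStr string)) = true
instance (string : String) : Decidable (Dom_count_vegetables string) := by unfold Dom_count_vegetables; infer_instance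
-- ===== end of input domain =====

-- B counts by sorting the word list and run-length-encoding the sorted list, instead of A's
-- hash-based Counter; same exact output (objective: alternative algorithm, not claimed faster).

-- ===== PORT A =====
def count_vegetables (string : String) : List (Int × String) :=
  let vegetables : List String :=
    ["cabbage", "carrot", "celery", "cucumber", "mushroom", "onion",
     "pepper", "potato", "tofu", "turnip"]
  PySem.List.sorted2
    ((((PySem.Dict.counter (PySem.Str.split₀ string)).items).filter
        (fun kv => vegetables.contains kv.1)).map (fun kv => (kv.2, kv.1)))
    Prod.fst Prod.snd true

-- ===== PORT B =====
-- run-length encoding of a (sorted) word list: the inner 'while ws[k] == head' counting loop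
-- is the takeWhile prefix, 'ws[k:]' is the dropWhile remainder
def pvRuns : List String → List (String × Int)
  | [] => []
  | x :: xs =>
    (x, ((xs.takeWhile (· == x)).length : Int) + 1) :: pvRuns (xs.dropWhile (· == x))
termination_by ws => ws.length
decreasing_by
  exact Nat.lt_succ_of_le (List.Sublist.length_le (List.dropWhile_sublist _))

def count_vegetables_alt (string : String) : List (Int × String) :=
  let vegetables : List String :=
    ["cabbage", "carrot", "celery", "cucumber", "mushroom", "onion",
     "pepper", "potato", "tofu", "turnip"]
  let rs := pvRuns (PySem.List.sorted (PySem.Str.split₀ string) (fun x => x) false)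
  let result := (rs.filter (fun p => vegetables.contains p.1)).map (fun p => (p.2, p.1))
  PySem.List.sorted2 result Prod.fst Prod.snd true

-- ===== PRECONDITION & SPEC =====
def Spec_count_vegetables (string : String) (out : List (Int × String)) : Prop := out = count_vegetables_alt string
instance (string : String) (out : List (Int × String)) : Decidable (Spec_count_vegetables string out) := by unfold Spec_count_vegetables; infer_instance

-- ===== CLAIM (what is proved, stated in full; the proofs are below) =====
def Claim_equal_count_vegetables : Prop := ∀ (string : String), Dom_count_vegetables string → Spec_count_vegetables string (count_vegetables string)

-- ===== LEMMAS AND PROOFS =====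

-- sorted2 with keys (fst, snd) is sorted with the lexicographic pair key
theorem pv_sorted2_eq_sorted_lex (xs : List (Int × String)) (rev : Bool) :
    PySem.List.sorted2 xs Prod.fst Prod.snd rev
      = PySem.List.sorted xs (fun x => toLex (x.1, x.2)) rev := by
  have hbefore :
      (fun (a b : Int × String) =>
        decide (a.1 < b.1) || (!decide (b.1 < a.1) && decide (a.2 < b.2)))
        = (fun (a b : Int × String) => decide (toLex (a.1, a.2) < toLex (b.1, b.2))) := by
    funext a b
    rcases lt_trichotomy a.1 b.1 with h | h | h <;>
      simp [Prod.Lex.lt_iff, h, lt_asymm]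
  have hbefore' :
      (fun (a b : Int × String) =>
        decide (b.1 < a.1) || (!decide (a.1 < b.1) && decide (b.2 < a.2)))
        = (fun (a b : Int × String) => decide (toLex (b.1, b.2) < toLex (a.1, a.2))) := by
    funext a b
    exact congrFun (congrFun hbefore b) a
  simp only [PySem.List.sorted2, PySem.List.sorted]
  rw [hbefore, hbefore']

-- descending sort of a permutation of a Nodup list, injective key
theorem pv_sorted_rev_eq_of_perm {α κ : Type} [LinearOrder κ]
    (xs ys : List α) (key : α → κ) (hinj : Function.Injective key)
    (hys : ys.Nodup) (hp : xs.Perm ys) :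
    PySem.List.sorted xs key true = PySem.List.sorted ys key true := by
  have hperm : (PySem.List.sorted ys key true).Perm ys := PySem.List.sorted_perm ys key true
  have hnodup : (PySem.List.sorted ys key true).Nodup := hperm.nodup_iff.mpr hys
  have hle := PySem.List.sorted_pairwise_rev ys key
  have hne : (PySem.List.sorted ys key true).Pairwise (· ≠ ·) := List.Pairwise.imp (by tauto) hnodup
  have hgt : (PySem.List.sorted ys key true).Pairwise (fun a b => key b < key a) := by
    refine (hle.and hne).imp ?_
    rintro a b ⟨h1, h2⟩
    exact lt_of_le_of_ne h1 (fun h => h2 (hinj h.symm))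
  exact PySem.List.sorted_rev_eq_of_perm_of_pairwise_gt xs _ key (hperm.trans hp.symm) hgt

theorem pv_lex_key_injective :
    Function.Injective (fun x : Int × String => toLex (x.1, x.2)) := by
  intro a b h
  have := congrArg ofLex h
  simpa using this

-- in a sorted list whose elements are all ≥ x, dropping the leading x's drops ALL x's
theorem pv_not_mem_dropWhile (l : List String) (x : String)
    (hs : l.Pairwise (· ≤ ·)) (hge : ∀ y ∈ l, x ≤ y) :
    x ∉ l.dropWhile (· == x) := by
  induction l with
  | nil => simp
  | cons y t ih =>
    by_cases hyx : (y == x) = true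
    · rw [List.dropWhile_cons, if_pos hyx]
      exact ih (List.Pairwise.of_cons hs) (fun z hz => hge z (List.mem_cons_of_mem _ hz))
    · rw [List.dropWhile_cons, if_neg hyx]
      intro hmem
      rcases List.mem_cons.mp hmem with h | h
      · exact hyx (by simp [h])
      · have h1 : x ≤ y := hge y (List.mem_cons_self)
        have h2 : y ≤ x := (List.pairwise_cons.mp hs).1 x h
        exact hyx (by simp [le_antisymm h2 h1])

-- characterisation of pvRuns on a sorted list: each run is (word, its total count), firsts are Nodup
theorem pvRuns_char (ws : List String) (hs : ws.Pairwise (· ≤ ·)) :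
    (∀ p ∈ pvRuns ws, p.1 ∈ ws ∧ p.2 = (ws.count p.1 : Int)) ∧
    (∀ w ∈ ws, w ∈ (pvRuns ws).map Prod.fst) ∧
    ((pvRuns ws).map Prod.fst).Nodup := by
  induction ws using pvRuns.induct with
  | case1 => simp [pvRuns]
  | case2 x xs ih =>
    have htail : xs.Pairwise (· ≤ ·) := List.Pairwise.of_cons hs
    have hge : ∀ y ∈ x :: xs, x ≤ y := by
      intro y hy
      rcases List.mem_cons.mp hy with h | h
      · exact le_of_eq h.symm
      · exact (List.pairwise_cons.mp hs).1 y h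
    have hrest : (xs.dropWhile (· == x)).Pairwise (· ≤ ·) :=
      List.Pairwise.sublist (List.dropWhile_sublist _) htail
    have hnotin : x ∉ xs.dropWhile (· == x) :=
      pv_not_mem_dropWhile xs x htail (fun y hy => hge y (List.mem_cons_of_mem _ hy))
    have hsplit : xs.takeWhile (· == x) ++ xs.dropWhile (· == x) = xs :=
      List.takeWhile_append_dropWhile
    have htake : ∀ y ∈ xs.takeWhile (· == x), y = x := by
      intro y hy
      have := List.mem_takeWhile_imp hy
      simpa using this
    obtain ⟨ih1, ih2, ih3⟩ := ih hrest
    have hcount_take : (xs.takeWhile (· == x)).count x = (xs.takeWhile (· == x)).length :=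
      List.count_eq_length.mpr (fun y hy => (htake y hy).symm)
    have h0x : xs.count x = (xs.takeWhile (· == x)).length := by
      have := congrArg (List.count x) hsplit
      rw [List.count_append, hcount_take, List.count_eq_zero.mpr hnotin] at this
      omega
    have hcount_x : (x :: xs).count x = (xs.takeWhile (· == x)).length + 1 := by
      simp [h0x]
    have hcount_ne : ∀ w, w ≠ x → (x :: xs).count w = (xs.dropWhile (· == x)).count w := by
      intro w hw
      have h0 : xs.count w = (xs.dropWhile (· == x)).count w := by
        have := congrArg (List.count w) hsplit
        rw [List.count_append,
          List.count_eq_zero.mpr (fun hmem => hw (htake w hmem))] at this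
        omega
      simp [Ne.symm hw, h0]
    refine ⟨?_, ?_, ?_⟩
    · intro p hp
      rw [pvRuns] at hp
      rcases List.mem_cons.mp hp with h | h
      · subst h
        refine ⟨List.mem_cons_self, ?_⟩
        simp only [hcount_x]
        push_cast
        ring
      · obtain ⟨hmem, hcnt⟩ := ih1 p h
        have hpx : p.1 ≠ x := fun hpx => hnotin (hpx ▸ hmem)
        refine ⟨List.mem_cons_of_mem _ ((List.dropWhile_sublist _).subset hmem), ?_⟩
        rw [hcnt, hcount_ne p.1 hpx]
    · intro w hw
      rw [pvRuns]
      rcases List.mem_cons.mp hw with h | h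
      · simp [h]
      · by_cases hwx : w = x
        · simp [hwx]
        · have hwrest : w ∈ xs.dropWhile (· == x) := by
            rcases (List.mem_append.mp (hsplit ▸ h : w ∈ _ ++ _)) with h' | h'
            · exact absurd (htake w h') hwx
            · exact h'
          simpa using Or.inr (by simpa using ih2 w hwrest)
    · rw [pvRuns]
      simp only [List.map_cons, List.nodup_cons]
      refine ⟨?_, ih3⟩
      intro hx
      rcases List.mem_map.mp hx with ⟨p, hp, hpx⟩
      exact hnotin (hpx ▸ (ih1 p hp).1)

-- membership in pvRuns of a sorted list is exactly (word ∈ list, count)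
theorem pvRuns_mem_iff (ws : List String) (hs : ws.Pairwise (· ≤ ·)) (p : String × Int) :
    p ∈ pvRuns ws ↔ p.1 ∈ ws ∧ p.2 = (ws.count p.1 : Int) := by
  obtain ⟨h1, h2, _⟩ := pvRuns_char ws hs
  constructor
  · exact h1 p
  · rintro ⟨hmem, hcnt⟩
    rcases List.mem_map.mp (h2 p.1 hmem) with ⟨q, hq, hq1⟩
    have : q = p := by
      have := (h1 q hq).2
      have hq2 : q.2 = p.2 := by rw [this, hq1, ← hcnt]
      exact Prod.ext hq1 hq2
    exact this ▸ hq

theorem count_vegetables_eq_alt (string : String) :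
    count_vegetables string = count_vegetables_alt string := by
  unfold count_vegetables count_vegetables_alt
  simp only []
  set veg : List String :=
    ["cabbage", "carrot", "celery", "cucumber", "mushroom", "onion",
     "pepper", "potato", "tofu", "turnip"] with hveg
  set words := PySem.Str.split₀ string with hwords
  set sws := PySem.List.sorted words (fun x => x) false with hsws
  have hsorted : sws.Pairwise (· ≤ ·) := by
    simpa using PySem.List.sorted_pairwise words (fun x => x)
  have hperm_sw : sws.Perm words := PySem.List.sorted_perm words (fun x => x) false
  obtain ⟨_, _, hnodupfst⟩ := pvRuns_char sws hsorted
  rw [PySem.Dict.items_counter, pv_sorted2_eq_sorted_lex, pv_sorted2_eq_sorted_lex]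
  refine pv_sorted_rev_eq_of_perm _ _ _ pv_lex_key_injective ?_ ?_
  · -- B's pre-sort list is Nodup
    refine List.Nodup.map ?_ (List.Nodup.filter _ (List.Nodup.of_map _ hnodupfst))
    intro a b h
    have h1 := congrArg Prod.snd h
    have h2 := congrArg Prod.fst h
    exact Prod.ext h1 h2
  · -- the two pre-sort lists are permutations
    refine List.Perm.map _ (List.Perm.filter _ ?_)
    rw [List.perm_ext_iff_of_nodup
      (List.Nodup.map (fun a b h => congrArg Prod.fst h) (PySem.Set.nodup_ofList words))
      (List.Nodup.of_map _ hnodupfst)]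
    intro p
    rw [pvRuns_mem_iff sws hsorted p]
    simp only [List.mem_map, PySem.Set.mem_ofList]
    constructor
    · rintro ⟨k, hk, hkp⟩
      subst hkp
      exact ⟨hperm_sw.mem_iff.mpr hk, by rw [hperm_sw.count_eq]⟩
    · rintro ⟨hmem, hcnt⟩
      refine ⟨p.1, hperm_sw.mem_iff.mp hmem, Prod.ext rfl ?_⟩
      rw [hcnt, hperm_sw.count_eq]

-- ===== VERDICT (by name: the statement is the Claim_ definition above) =====
theorem count_vegetables_spec : Claim_equal_count_vegetables := by
  intro string _
  exact count_vegetables_eq_alt string
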